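-- pv_equiv track=rewrite | github.com/pypi-data/pypi-mirror-396 | packages/anyt/anyt-0.11.3-py3-none-any.whl/worker/actions/local_task.py | _parse_checklist_md
-- ===== SOURCE A (Python) =====
-- def _parse_checklist_md(content: str) -> str:
--     """Parse checklist.md content, stripping the header if present.
--
--     Args:
--         content: Raw content of checklist.md file
--
--     Returns:
--         Checklist content without the "# Checklist" header
--     """
--     lines = content.strip().split("\n")
--     # Skip the header line if present
--     start = 0
--     for i, line in enumerate(lines):
--         if line.strip().lower().startswith("# checklist"):
--             start = i + 1
--             # Skip any empty lines after the header
--             while start < len(lines) and not lines[start].strip():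
--                 start += 1
--             break
--     return "\n".join(lines[start:]).strip()
-- ===== SOURCE B (Python) =====
-- def _parse_checklist_md(content: str) -> str:
--     """Strip the "# Checklist" header (if any) from checklist.md content.
--
--     Single forward pass with an accumulator: lines are collected as they come;
--     the first header line resets the accumulator (discarding it and everything
--     before it), so no index search, slicing or blank-line skipping is needed —
--     the final strip() removes any leading blank lines left after the header.
--     """
--     kept = []
--     seen_header = False
--     for line in content.strip().split("\n"):
--         if not seen_header and line.strip().lower().startswith("# checklist"):
--             kept = []
--             seen_header = True
--         else:
--             kept.append(line)
--     return "\n".join(kept).strip()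
-- ===== Notes on version B (the rewrite author's own statement) =====
-- stated objective: alternative
-- what changed: Replaced A's staged search (find header index, skip blank lines with an inner while, then slice and join) by a single forward pass with an accumulator that is reset when the first header line is met, with the final strip() absorbing the blank lines A skipped explicitly.
import Mathlib
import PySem

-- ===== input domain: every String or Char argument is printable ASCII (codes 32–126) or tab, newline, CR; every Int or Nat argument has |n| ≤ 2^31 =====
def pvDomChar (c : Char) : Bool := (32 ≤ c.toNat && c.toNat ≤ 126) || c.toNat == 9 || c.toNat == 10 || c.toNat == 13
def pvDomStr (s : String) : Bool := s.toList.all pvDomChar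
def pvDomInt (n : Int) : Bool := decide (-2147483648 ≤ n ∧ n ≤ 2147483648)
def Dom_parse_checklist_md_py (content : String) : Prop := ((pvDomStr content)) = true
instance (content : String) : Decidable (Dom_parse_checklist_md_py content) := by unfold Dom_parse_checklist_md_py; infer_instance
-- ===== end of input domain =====

-- B replaces A's staged search+blank-skip+slice by one forward pass with an accumulator
-- that is reset at the first header line (objective: alternative, same cost).

-- ===== PORT A =====

-- line.strip().lower().startswith("# checklist")
def pvHeaderPred (line : List Char) : Bool :=
  PySem.Chars.startswith (PySem.Chars.lower (PySem.Chars.strip line)) "# checklist".toList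

-- the inner 'while start < len(lines) and not lines[start].strip(): start += 1'
def pvSkipBlanks (lines : List (List Char)) (start : Nat) : Nat :=
  if h : start < lines.length then
    if PySem.Chars.strip lines[start] = [] then pvSkipBlanks lines (start + 1) else start
  else start
termination_by lines.length - start

-- the 'for i, line in enumerate(lines): … break' loop, returning the final value of 'start'
def pvFindStart (all : List (List Char)) (rest : List (List Char)) (i : Nat) : Nat :=
  match rest with
  | [] => 0
  | l :: t => if pvHeaderPred l then pvSkipBlanks all (i + 1) else pvFindStart all t (i + 1)

def parse_checklist_md_py (content : String) : String :=
  let lines := PySem.Chars.splitOn (PySem.Chars.strip content.toList) ['\n']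
  let start := pvFindStart lines lines 0
  String.ofList (PySem.Chars.strip (PySem.Chars.join ['\n'] (lines.drop start)))

-- ===== PORT B =====

-- the body of B's for-loop over (kept, seen_header)
def pvStepB (st : List (List Char) × Bool) (line : List Char) : List (List Char) × Bool :=
  if !st.2 && PySem.Chars.startswith (PySem.Chars.lower (PySem.Chars.strip line)) "# checklist".toList
  then ([], true)
  else (st.1 ++ [line], st.2)

def parse_checklist_md_py_alt (content : String) : String :=
  let lines := PySem.Chars.splitOn (PySem.Chars.strip content.toList) ['\n']
  let kept := (lines.foldl pvStepB ([], false)).1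
  String.ofList (PySem.Chars.strip (PySem.Chars.join ['\n'] kept))

-- ===== PRECONDITION & SPEC =====
def Spec_parse_checklist_md_py (content : String) (out : String) : Prop := out = parse_checklist_md_py_alt content
instance (content : String) (out : String) : Decidable (Spec_parse_checklist_md_py content out) := by unfold Spec_parse_checklist_md_py; infer_instance

-- ===== CLAIM (what is proved, stated in full; the proofs are below) =====
def Claim_equal_parse_checklist_md_py : Prop := ∀ (content : String), Dom_parse_checklist_md_py content → Spec_parse_checklist_md_py content (parse_checklist_md_py content)

-- ===== LEMMAS AND PROOFS =====

-- a line with empty strip consists of whitespace only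
lemma pv_strip_eq_nil (l : List Char) (h : PySem.Chars.strip l = []) :
    ∀ c ∈ l, PySem.Chars.isspace c = true := by
  intro c hc
  simp only [PySem.Chars.strip, PySem.Chars.rstrip, PySem.Chars.lstrip] at h
  rw [List.reverse_eq_nil_iff, List.dropWhile_eq_nil_iff] at h
  conv at hc => rw [← List.takeWhile_append_dropWhile (p := PySem.Chars.isspace) (l := l)]
  rcases List.mem_append.mp hc with h1 | h2
  · exact List.mem_takeWhile_imp h1
  · exact h c (List.mem_reverse.mpr h2)

-- dropping a whitespace prefix does not change strip
lemma pv_strip_append_ws (ws cs : List Char) (h : ∀ c ∈ ws, PySem.Chars.isspace c = true) :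
    PySem.Chars.strip (ws ++ cs) = PySem.Chars.strip cs := by
  simp only [PySem.Chars.strip, PySem.Chars.lstrip]
  rw [List.dropWhile_append]
  simp [List.dropWhile_eq_nil_iff.mpr h]

-- a blank first line disappears under the final strip
lemma pv_strip_join_blank (l : List Char) (rest : List (List Char))
    (h : PySem.Chars.strip l = []) :
    PySem.Chars.strip (PySem.Chars.join ['\n'] (l :: rest)) =
      PySem.Chars.strip (PySem.Chars.join ['\n'] rest) := by
  cases rest with
  | nil =>
      have hj : PySem.Chars.join ['\n'] [l] = l := by simp [PySem.Chars.join, List.intercalate]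
      rw [hj, h]
      rfl
  | cons r t =>
      have hjoin : PySem.Chars.join ['\n'] (l :: r :: t) =
          (l ++ ['\n']) ++ PySem.Chars.join ['\n'] (r :: t) := by
        simp [PySem.Chars.join, List.intercalate]
      rw [hjoin, pv_strip_append_ws]
      intro c hc
      rcases List.mem_append.mp hc with h1 | h2
      · exact pv_strip_eq_nil l h c h1
      · simp at h2; subst h2; decide

-- skipping blank lines is absorbed by the final strip
lemma pv_skip_strip (lines : List (List Char)) (s : Nat) :
    PySem.Chars.strip (PySem.Chars.join ['\n'] (lines.drop (pvSkipBlanks lines s))) =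
      PySem.Chars.strip (PySem.Chars.join ['\n'] (lines.drop s)) := by
  unfold pvSkipBlanks
  split
  · rename_i hlt
    split
    · rename_i hblank
      have hdrop : lines.drop s = lines[s] :: lines.drop (s + 1) :=
        List.drop_eq_getElem_cons hlt
      rw [pv_skip_strip lines (s + 1), hdrop, pv_strip_join_blank _ _ hblank]
    · rfl
  · rfl
termination_by lines.length - s

-- A's search loop in terms of the first-match index
lemma pv_findStart_eq (all : List (List Char)) (rest : List (List Char)) (i : Nat) :
    pvFindStart all rest i =
      match rest.findIdx? pvHeaderPred with
      | none => 0
      | some j => pvSkipBlanks all (i + j + 1) := by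
  induction rest generalizing i with
  | nil => rfl
  | cons l t ih =>
      simp only [pvFindStart, List.findIdx?_cons]
      by_cases hp : pvHeaderPred l
      · simp [hp]
      · simp only [hp, Bool.false_eq_true, ite_false, ih (i + 1)]
        cases h : t.findIdx? pvHeaderPred with
        | none => simp
        | some j => simp [Nat.add_assoc, Nat.add_comm 1 j]

-- once the header was seen, B's fold just appends every remaining line
lemma pv_foldB_true (rest : List (List Char)) (acc : List (List Char)) :
    rest.foldl pvStepB (acc, true) = (acc ++ rest, true) := by
  induction rest generalizing acc with
  | nil => simp
  | cons l t ih => simp [pvStepB, ih]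

-- before the header, B's fold computes the first-match suffix
lemma pv_foldB_false (rest : List (List Char)) (acc : List (List Char)) :
    rest.foldl pvStepB (acc, false) =
      match rest.findIdx? pvHeaderPred with
      | none => (acc ++ rest, false)
      | some j => (rest.drop (j + 1), true) := by
  induction rest generalizing acc with
  | nil => simp
  | cons l t ih =>
      simp only [List.foldl_cons, List.findIdx?_cons]
      by_cases hp : pvHeaderPred l
      · have hstep : pvStepB (acc, false) l = ([], true) := by
          simp [pvStepB, pvHeaderPred] at hp ⊢; exact hp
        rw [hstep, pv_foldB_true]
        simp [hp]
      · have hstep : pvStepB (acc, false) l = (acc ++ [l], false) := by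
          simp [pvStepB, pvHeaderPred] at hp ⊢; exact hp
        rw [hstep, ih]
        cases h : t.findIdx? pvHeaderPred with
        | none => simp [hp]
        | some j => simp [hp]

-- ===== VERDICT (by name: the statement is the Claim_ definition above) =====
theorem parse_checklist_md_py_spec : Claim_equal_parse_checklist_md_py := by
  intro content _
  unfold Spec_parse_checklist_md_py parse_checklist_md_py parse_checklist_md_py_alt
  dsimp only
  set lines := PySem.Chars.splitOn (PySem.Chars.strip content.toList) ['\n'] with hl
  rw [pv_findStart_eq lines lines 0, pv_foldB_false lines []]
  cases lines.findIdx? pvHeaderPred with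
  | none => simp
  | some j =>
      dsimp only
      rw [Nat.zero_add, pv_skip_strip lines (j + 1)]
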